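-- pv_equiv track=rewrite | github.com/ShaharBenIshay/Song-Lyrics-Generator-LSTM | evaluation.py | paragraph_to_sentences
-- ===== SOURCE A (Python) =====
-- def paragraph_to_sentences(pargraph, num_sentences):
--     sentences = []
--     current_sentence = []
--     sentence_size = int(len(pargraph) / num_sentences)
--     for word in pargraph:
--         current_sentence.append(word)
--         if len(current_sentence) == sentence_size:
--             sentences.append(" ".join(current_sentence))
--             current_sentence = []
--     if current_sentence:
--         sentences.append(" ".join(current_sentence))
--     return sentences
-- ===== SOURCE B (Python) =====
-- def paragraph_to_sentences(pargraph, num_sentences):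
--     sentence_size = int(len(pargraph) / num_sentences)
--     if sentence_size <= 0:
--         # no positive chunk size: everything (if anything) is one sentence
--         return [" ".join(pargraph)] if pargraph else []
--     sentences = []
--     i = 0
--     while i < len(pargraph):
--         sentences.append(" ".join(pargraph[i:i + sentence_size]))
--         i += sentence_size
--     return sentences
-- ===== Notes on version B (the rewrite author's own statement) =====
-- stated objective: alternative
-- what changed: Replaces A's word-by-word accumulator loop with length checks by a recursive take/drop slicing decomposition, with the degenerate chunk-size regime handled up front.
import Mathlib
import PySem

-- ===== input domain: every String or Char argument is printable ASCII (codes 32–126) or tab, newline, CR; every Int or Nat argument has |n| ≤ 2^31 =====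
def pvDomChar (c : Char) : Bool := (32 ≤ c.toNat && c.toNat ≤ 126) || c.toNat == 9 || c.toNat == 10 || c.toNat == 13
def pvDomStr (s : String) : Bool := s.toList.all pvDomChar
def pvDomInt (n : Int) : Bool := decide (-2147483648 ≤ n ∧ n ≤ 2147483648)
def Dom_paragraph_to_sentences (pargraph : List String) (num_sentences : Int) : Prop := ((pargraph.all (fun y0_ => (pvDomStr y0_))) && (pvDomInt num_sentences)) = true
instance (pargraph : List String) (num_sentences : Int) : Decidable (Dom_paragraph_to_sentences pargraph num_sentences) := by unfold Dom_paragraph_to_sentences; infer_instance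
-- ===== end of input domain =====

-- B replaces A's word-by-word accumulator loop (append + length check per word) by an index
-- loop that slices whole chunks, with the degenerate chunk-size regime handled up front;
-- objective: alternative (same asymptotic cost).


-- ===== PORT A =====
-- A's loop body and the trailing 'if current_sentence:' flush, as named helpers.
def pvStep (size : Int) (st : List String × List String) (word : String) : List String × List String :=
  let current_sentence := st.2 ++ [word]
  if (current_sentence.length : Int) = size then
    (st.1 ++ [PySem.Str.join " " current_sentence], [])
  else (st.1, current_sentence)

def pvFinish (st : List String × List String) : List String :=
  if st.2 ≠ [] then st.1 ++ [PySem.Str.join " " st.2] else st.1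

-- int(len(pargraph) / num_sentences): truncation toward zero; exact as Int.tdiv here since
-- |len| and |num_sentences| ≤ 2^31 keep the float division's rounding below the truncation gap.
def paragraph_to_sentences (pargraph : List String) (num_sentences : Int) : List String :=
  let sentence_size : Int := Int.tdiv (pargraph.length : Int) num_sentences
  pvFinish (pargraph.foldl (pvStep sentence_size) ([], []))

-- ===== PORT B =====
-- B's while loop: i only ever holds 0, k, 2k, … so it is a Nat; pargraph[i:i+k] is
-- PySem.List.slice with the corresponding Int bounds. Called only with 0 < k;
-- the '0 < k' conjunct in the guard is a totality bound (i strictly grows by k).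
def pvLoopB (l : List String) (k : Nat) (i : Nat) (acc : List String) : List String :=
  if i < l.length ∧ 0 < k then
    pvLoopB l k (i + k) (acc ++ [PySem.Str.join " " (PySem.List.slice l (some (i : Int)) (some ((i : Int) + (k : Int))))])
  else acc
termination_by l.length - i
decreasing_by omega

def paragraph_to_sentences_alt (pargraph : List String) (num_sentences : Int) : List String :=
  let sentence_size : Int := Int.tdiv (pargraph.length : Int) num_sentences
  if sentence_size ≤ 0 then
    if pargraph ≠ [] then [PySem.Str.join " " pargraph] else []
  else pvLoopB pargraph sentence_size.toNat 0 []

-- ===== PRECONDITION & SPEC =====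
-- Pre_ excludes exactly num_sentences = 0, where A raises ZeroDivisionError.
def Pre_paragraph_to_sentences (pargraph : List String) (num_sentences : Int) : Prop := num_sentences ≠ 0
instance (pargraph : List String) (num_sentences : Int) : Decidable (Pre_paragraph_to_sentences pargraph num_sentences) := by unfold Pre_paragraph_to_sentences; infer_instance
def pvWitness_paragraph_to_sentences : List String × Int := (["a", "b", "c"], 2)

def Spec_paragraph_to_sentences (pargraph : List String) (num_sentences : Int) (out : List String) : Prop := out = paragraph_to_sentences_alt pargraph num_sentences
instance (pargraph : List String) (num_sentences : Int) (out : List String) : Decidable (Spec_paragraph_to_sentences pargraph num_sentences out) := by unfold Spec_paragraph_to_sentences; infer_instance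

-- ===== CLAIM (what is proved, stated in full; the proofs are below) =====
def Claim_equal_paragraph_to_sentences : Prop := ∀ (pargraph : List String) (num_sentences : Int), Dom_paragraph_to_sentences pargraph num_sentences → Pre_paragraph_to_sentences pargraph num_sentences → Spec_paragraph_to_sentences pargraph num_sentences (paragraph_to_sentences pargraph num_sentences)

-- ===== LEMMAS AND PROOFS =====

-- Proof-side intermediate form: both ports' positive-size result is this recursive chunking.
def pvChunks (k : Nat) (words : List String) : List String :=
  if words.length ≤ k ∨ k = 0 then [PySem.Str.join " " words]
  else PySem.Str.join " " (words.take k) :: pvChunks k (words.drop k)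
termination_by words.length
decreasing_by simp_all [List.length_drop]; omega

-- While the running sentence can never reach the size, A's loop only accumulates.
lemma pvStep_run_small (size : Int) :
    ∀ (l : List String) (acc cur : List String), ((cur.length + l.length : Nat) : Int) < size ∨ size ≤ 0 →
      l.foldl (pvStep size) (acc, cur) = (acc, cur ++ l) := by
  intro l
  induction l with
  | nil => intro acc cur _; simp
  | cons w t ih =>
    intro acc cur h
    have hne : (((cur ++ [w]).length : Nat) : Int) ≠ size := by
      rcases h with h | h <;> simp at h ⊢ <;> omega
    simp only [List.foldl_cons, pvStep, if_neg hne]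
    rw [ih acc (cur ++ [w]) (by rcases h with h | h
                                · left; simp at h ⊢; omega
                                · right; exact h)]
    simp

-- One full chunk: A's loop flushes the first k - |cur| remaining words.
lemma pvStep_run_cut (k : Nat) (hk : 0 < k) :
    ∀ (l : List String) (acc cur : List String), cur.length < k → k ≤ cur.length + l.length →
      l.foldl (pvStep (k : Int)) (acc, cur) =
        (l.drop (k - cur.length)).foldl (pvStep (k : Int))
          (acc ++ [PySem.Str.join " " (cur ++ l.take (k - cur.length))], []) := by
  intro l
  induction l with
  | nil => intro acc cur h1 h2; simp at h2; omega
  | cons w t ih =>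
    intro acc cur h1 h2
    by_cases he : cur.length + 1 = k
    · have hpos : (((cur ++ [w]).length : Nat) : Int) = (k : Int) := by simp; omega
      simp only [List.foldl_cons, pvStep, if_pos hpos]
      have hk1 : k - cur.length = 1 := by omega
      simp [hk1]
    · have hne : (((cur ++ [w]).length : Nat) : Int) ≠ (k : Int) := by simp; omega
      simp only [List.foldl_cons, pvStep, if_neg hne]
      rw [ih acc (cur ++ [w]) (by simp; omega) (by simp at h2 ⊢; omega)]
      obtain ⟨m, hm⟩ : ∃ m, k - cur.length = m + 1 := ⟨k - cur.length - 1, by omega⟩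
      have hm' : k - (cur ++ [w]).length = m := by simp; omega
      rw [hm', hm]
      simp [List.take_succ_cons, List.drop_succ_cons]

-- A's whole loop produces exactly the recursive chunking.
lemma pvMainA (k : Nat) (hk : 0 < k) :
    ∀ (n : Nat) (l : List String), l.length = n → ∀ (acc : List String),
      pvFinish (l.foldl (pvStep (k : Int)) (acc, [])) =
        acc ++ (if l = [] then [] else pvChunks k l) := by
  intro n
  induction n using Nat.strong_induction_on with
  | _ n ih =>
    intro l hl acc
    by_cases hnil : l = []
    · subst hnil; simp [pvFinish]
    · by_cases hsmall : l.length < k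
      · rw [pvStep_run_small (k : Int) l acc [] (by left; simp; omega)]
        rw [pvChunks]
        simp [pvFinish, hnil, if_pos (Or.inl (le_of_lt hsmall))]
      · rw [pvStep_run_cut k hk l acc [] (by simp; omega) (by simp; omega)]
        simp only [List.length_nil, Nat.sub_zero, List.nil_append]
        by_cases heq : l.length = k
        · have hdrop : l.drop k = [] := by simp; omega
          have htake : l.take k = l := by simp; omega
          rw [hdrop, htake]
          rw [pvChunks]
          simp [pvFinish, hnil, if_pos (Or.inl (le_of_eq heq))]
        · have hlt : (l.drop k).length < n := by simp; omega
          have hdne : l.drop k ≠ [] := by simp; omega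
          rw [ih (l.drop k).length hlt (l.drop k) rfl]
          rw [if_neg hdne]
          conv_rhs => rw [pvChunks]
          rw [if_neg (show ¬(l.length ≤ k ∨ k = 0) by omega)]
          rw [List.append_assoc, List.singleton_append, if_neg hnil]

-- B's index loop produces the same recursive chunking of the unprocessed suffix.
lemma pvMainB (k : Nat) (hk : 0 < k) :
    ∀ (m : Nat) (l : List String) (i : Nat), l.length - i = m → i < l.length → ∀ (acc : List String),
      pvLoopB l k i acc = acc ++ pvChunks k (l.drop i) := by
  intro m
  induction m using Nat.strong_induction_on with
  | _ m ih =>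
    intro l i hm hi acc
    rw [pvLoopB, if_pos ⟨hi, hk⟩]
    have hslice : PySem.List.slice l (some (i : Int)) (some ((i : Int) + (k : Int))) = (l.drop i).take k :=
      PySem.List.slice_natCast_add l i k
    rw [hslice]
    by_cases hend : l.length ≤ i + k
    · rw [pvLoopB, if_neg (by omega)]
      have htake : (l.drop i).take k = l.drop i := List.take_of_length_le (by simp; omega)
      rw [htake, pvChunks, if_pos (Or.inl (show (l.drop i).length ≤ k by simp only [List.length_drop]; omega))]
    · rw [ih (l.length - (i + k)) (by omega) l (i + k) rfl (by omega) _]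
      have hdd : l.drop (i + k) = (l.drop i).drop k := by rw [List.drop_drop]
      rw [hdd]
      conv_rhs => rw [pvChunks]
      rw [if_neg (show ¬((l.drop i).length ≤ k ∨ k = 0) by simp; omega)]
      rw [List.append_assoc, List.singleton_append]

-- ===== VERDICT (by name: the statement is the Claim_ definition above) =====
theorem paragraph_to_sentences_spec : Claim_equal_paragraph_to_sentences := by
  intro pargraph num_sentences _ _
  unfold Spec_paragraph_to_sentences paragraph_to_sentences paragraph_to_sentences_alt
  simp only []
  set size := Int.tdiv (pargraph.length : Int) num_sentences with hsize
  by_cases hpos : size ≤ 0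
  · rw [if_pos hpos]
    rw [pvStep_run_small size pargraph [] [] (Or.inr hpos)]
    simp [pvFinish]
  · rw [if_neg hpos]
    push_neg at hpos
    have hk : 0 < size.toNat := by omega
    have hcast : (size.toNat : Int) = size := by omega
    have hnil : pargraph ≠ [] := by
      intro h
      rw [h] at hsize
      simp [Int.tdiv] at hsize
      rcases num_sentences with a | a <;> simp [hsize, Int.tdiv] at hpos
    have hlen : 0 < pargraph.length := List.length_pos_iff.mpr hnil
    have hmainA := pvMainA size.toNat hk pargraph.length pargraph rfl []
    rw [hcast] at hmainA
    rw [hmainA]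
    rw [pvMainB size.toNat hk (pargraph.length - 0) pargraph 0 rfl (by omega) []]
    simp [hnil]
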